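-- pv_equiv track=rewrite | github.com/hariprahal/yet_another_foobar_challenge | lovely_lucky_lambs.py | get_generous
-- ===== SOURCE A (Python) =====
-- def get_generous(total_lambs):
--     arr = [1, 2]
--     ind = 1
--     total_lambs -= 3
--     while total_lambs > 0:
--         to_add = arr[ind] * 2
--         total_lambs -= to_add
--         if total_lambs >= 0:
--             arr.append(to_add)
--             ind += 1
--         else:
--             total_lambs += to_add
--             break
--
--     if 2 * arr[len(arr) - 1] >= total_lambs >= arr[len(arr) - 1] + arr[len(arr) - 2]:
--         arr.append(total_lambs)
--
--     return len(arr)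
-- ===== SOURCE B (Python) =====
-- def get_generous(total_lambs):
--     t = total_lambs - 3
--     if t <= 0:
--         return 2
--     m = max((t + 4).bit_length() - 3, 0)
--     r = t - (2 ** (m + 2) - 4)
--     count = 2 + m
--     if 2 ** (m + 2) >= r >= 2 ** (m + 1) + 2 ** m:
--         count += 1
--     return count
-- ===== Notes on version B (the rewrite author's own statement) =====
-- stated objective: simpler
-- what changed: Replaced A's doubling while-loop that grows a list of powers of two with a closed form: the number of doubling terms is derived directly from (t+4).bit_length(), then the same trailing bonus rule is applied arithmetically; no list is built.
import Mathlib
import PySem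

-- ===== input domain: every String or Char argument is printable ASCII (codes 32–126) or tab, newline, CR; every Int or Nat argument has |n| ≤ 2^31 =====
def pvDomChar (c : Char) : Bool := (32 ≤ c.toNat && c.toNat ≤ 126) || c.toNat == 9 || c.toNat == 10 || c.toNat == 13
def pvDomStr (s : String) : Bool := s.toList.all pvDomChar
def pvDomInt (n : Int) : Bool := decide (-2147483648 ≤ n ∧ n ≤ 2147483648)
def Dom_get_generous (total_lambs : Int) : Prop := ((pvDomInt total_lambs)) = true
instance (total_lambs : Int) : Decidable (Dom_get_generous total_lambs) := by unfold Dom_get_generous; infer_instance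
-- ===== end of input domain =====

-- B replaces A's doubling loop by a closed form via bit_length (simpler, no list built); same value on every Int.

-- ===== PORT A =====
-- the while loop of A; fuel bounds the iteration count (each pass shrinks t by ≥ 4), purely to make it total
def get_generous_loop (arr : List Int) (ind : Int) (t : Int) : Nat → List Int × Int
  | 0 => (arr, t)
  | fuel + 1 =>
    if t > 0 then
      let to_add := ((PySem.List.pyGet? arr ind).getD 0) * 2
      let t' := t - to_add
      if t' ≥ 0 then get_generous_loop (arr ++ [to_add]) (ind + 1) t' fuel
      else (arr, t)
    else (arr, t)

def get_generous (total_lambs : Int) : Int :=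
  let t := total_lambs - 3
  let p := get_generous_loop [1, 2] 1 t t.toNat
  let arr := p.1
  let tl := p.2
  let last := (PySem.List.pyGet? arr ((arr.length : Int) - 1)).getD 0
  let second := (PySem.List.pyGet? arr ((arr.length : Int) - 2)).getD 0
  let arr2 := if 2 * last ≥ tl ∧ tl ≥ last + second then arr ++ [tl] else arr
  (arr2.length : Int)

-- ===== PORT B =====
def get_generous_alt (total_lambs : Int) : Int :=
  let t := total_lambs - 3
  if t ≤ 0 then 2
  else
    let m : Int := max ((PySem.Int.bitLength (t + 4) : Int) - 3) 0
    let r := t - ((2 : Int) ^ (m.toNat + 2) - 4)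
    let count := 2 + m
    if (2 : Int) ^ (m.toNat + 2) ≥ r ∧ r ≥ (2 : Int) ^ (m.toNat + 1) + (2 : Int) ^ m.toNat then
      count + 1
    else count

-- ===== PRECONDITION & SPEC =====
def Spec_get_generous (total_lambs : Int) (out : Int) : Prop := out = get_generous_alt total_lambs
instance (total_lambs : Int) (out : Int) : Decidable (Spec_get_generous total_lambs out) := by unfold Spec_get_generous; infer_instance

-- ===== CLAIM (what is proved, stated in full; the proofs are below) =====
def Claim_equal_get_generous : Prop := ∀ (total_lambs : Int), Dom_get_generous total_lambs → Spec_get_generous total_lambs (get_generous total_lambs)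

-- ===== LEMMAS AND PROOFS =====

-- A's array after appending the doubles up to index k: [1, 2, 4, …, 2^k]
def arrOf (k : Nat) : List Int := (List.range (k + 1)).map fun i => (2 : Int) ^ i

theorem arrOf_length (k : Nat) : (arrOf k).length = k + 1 := by simp [arrOf]

theorem arrOf_succ (k : Nat) : arrOf (k + 1) = arrOf k ++ [(2 : Int) ^ (k + 1)] := by
  simp [arrOf, List.range_succ]

theorem arrOf_get (k i : Nat) (h : i < k + 1) :
    PySem.List.pyGet? (arrOf k) (i : Int) = some ((2 : Int) ^ i) := by
  rw [PySem.List.pyGet?_natCast]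
  simp [arrOf, h]

theorem bl_eq (s : Int) (k : Nat) (h1 : (2 : Int) ^ k ≤ s) (h2 : s < 2 ^ (k + 1)) :
    PySem.Int.bitLength s = k + 1 := by
  have hs0 : 0 < s := lt_of_lt_of_le (by positivity) h1
  have hcast : (s.natAbs : Int) = s := Int.natAbs_of_nonneg hs0.le
  have h1' : 2 ^ k ≤ s.natAbs := by rw [← hcast] at h1; exact_mod_cast h1
  have h2' : s.natAbs < 2 ^ (k + 1) := by rw [← hcast] at h2; exact_mod_cast h2
  have hl := PySem.Int.two_pow_bitLength_le s (by omega)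
  have hu := PySem.Int.lt_two_pow_bitLength s
  set b := PySem.Int.bitLength s with hb
  have hkb : k < b := by
    have : (2 : Nat) ^ k < 2 ^ b := lt_of_le_of_lt h1' hu
    exact (Nat.pow_lt_pow_iff_right (by norm_num)).mp this
  have hbk : b - 1 < k + 1 := by
    have : (2 : Nat) ^ (b - 1) < 2 ^ (k + 1) := lt_of_le_of_lt hl h2'
    exact (Nat.pow_lt_pow_iff_right (by norm_num)).mp this
  omega

theorem loop_spec : ∀ (fuel ind : Nat) (t : Int), 1 ≤ ind → 0 ≤ t → t.toNat ≤ fuel →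
    get_generous_loop (arrOf ind) (ind : Int) t fuel =
      (arrOf (PySem.Int.bitLength (t + 2 ^ (ind + 1)) - 2),
       t - ((2 : Int) ^ (PySem.Int.bitLength (t + 2 ^ (ind + 1)) - 1) - 2 ^ (ind + 1))) := by
  intro fuel
  induction fuel with
  | zero =>
    intro ind t hind ht hf
    have ht0 : t = 0 := by omega
    subst ht0
    have hbl : PySem.Int.bitLength ((0 : Int) + 2 ^ (ind + 1)) = ind + 2 := by
      rw [zero_add]
      exact bl_eq _ (ind + 1) le_rfl (by
        have : (2 : Int) ^ (ind + 1) < 2 ^ (ind + 1 + 1) := by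
          apply pow_lt_pow_right₀ <;> norm_num
        exact this)
    rw [hbl]
    simp [get_generous_loop]
  | succ fuel ih =>
    intro ind t hind ht hf
    by_cases ht0 : t = 0
    · subst ht0
      have hbl : PySem.Int.bitLength ((0 : Int) + 2 ^ (ind + 1)) = ind + 2 := by
        rw [zero_add]
        exact bl_eq _ (ind + 1) le_rfl (by
          apply pow_lt_pow_right₀ <;> norm_num)
      rw [hbl]
      simp [get_generous_loop]
    · have htpos : 0 < t := by omega
      have hget : PySem.List.pyGet? (arrOf ind) (ind : Int) = some ((2 : Int) ^ ind) :=
        arrOf_get ind ind (by omega)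
      rw [get_generous_loop, if_pos htpos, hget]
      simp only [Option.getD_some]
      have hpow : (2 : Int) ^ ind * 2 = 2 ^ (ind + 1) := by ring
      by_cases hge : t - (2 : Int) ^ ind * 2 ≥ 0
      · rw [if_pos hge, hpow, ← arrOf_succ]
        have hc : ((ind : Int) + 1) = ((ind + 1 : Nat) : Int) := by push_cast; ring
        rw [hc]
        have h4 : (4 : Int) ≤ 2 ^ (ind + 1) := by
          calc (4 : Int) = 2 ^ 2 := by norm_num
          _ ≤ 2 ^ (ind + 1) := by apply pow_le_pow_right₀ <;> omega
        have := ih (ind + 1) (t - 2 ^ (ind + 1)) (by omega)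
          (by rw [hpow] at hge; omega) (by omega)
        rw [this]
        have hs : t - (2 : Int) ^ (ind + 1) + 2 ^ (ind + 1 + 1) = t + 2 ^ (ind + 1) := by ring
        rw [hs, Prod.mk.injEq]
        refine ⟨rfl, ?_⟩
        have h2 : (2 : Int) ^ (ind + 1 + 1) = 2 * 2 ^ (ind + 1) := by ring
        rw [h2]; ring
      · rw [if_neg hge]
        have hlt : t < 2 ^ (ind + 1) := by rw [hpow] at hge; omega
        have hbl : PySem.Int.bitLength (t + 2 ^ (ind + 1)) = ind + 2 := by
          apply bl_eq _ (ind + 1) (by omega)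
          have : (2 : Int) ^ (ind + 1 + 1) = 2 ^ (ind + 1) + 2 ^ (ind + 1) := by ring
          omega
        rw [hbl]
        simp

theorem get_generous_eq_alt (n : Int) : get_generous n = get_generous_alt n := by
  by_cases hle : n - 3 ≤ 0
  · have h0 : (n - 3).toNat = 0 := by omega
    simp only [get_generous, get_generous_alt, h0]
    rw [if_pos hle]
    norm_num [get_generous_loop, PySem.List.pyGet?, PySem.List.pyIdx?]
    split_ifs with h
    · exfalso; omega
    · norm_num
  · simp only [get_generous, get_generous_alt]
    rw [if_neg hle]
    have hloop := loop_spec (n - 3).toNat 1 (n - 3) le_rfl (by omega) le_rfl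
    have e24 : (2 : Int) ^ (1 + 1) = 4 := by norm_num
    have harr : arrOf 1 = [1, 2] := by decide
    have h1 : ((1 : Nat) : Int) = 1 := Nat.cast_one
    rw [e24, harr, h1] at hloop
    rw [hloop]
    set B := PySem.Int.bitLength (n - 3 + 4) with hBdef
    have hB3 : 3 ≤ B := by
      have h5 : (2 : Int) ^ 2 ≤ n - 3 + 4 := by norm_num; omega
      have hub := PySem.Int.lt_two_pow_bitLength (n - 3 + 4)
      have hcast : (((n - 3 + 4).natAbs : Int)) = n - 3 + 4 := Int.natAbs_of_nonneg (by omega)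
      have h5' : 2 ^ 2 ≤ (n - 3 + 4).natAbs := by rw [← hcast] at h5; exact_mod_cast h5
      have hlt : (2 : Nat) ^ 2 < 2 ^ B := lt_of_le_of_lt h5' hub
      have := (Nat.pow_lt_pow_iff_right (a := 2) (by norm_num)).mp hlt
      omega
    simp only [arrOf_length]
    have hlen1 : ((B - 2 + 1 : Nat) : Int) - 1 = ((B - 2 : Nat) : Int) := by omega
    have hlen2 : ((B - 2 + 1 : Nat) : Int) - 2 = ((B - 2 - 1 : Nat) : Int) := by omega
    rw [hlen1, hlen2, arrOf_get (B - 2) (B - 2) (by omega),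
        arrOf_get (B - 2) (B - 2 - 1) (by omega)]
    simp only [Option.getD_some]
    have hmax : max ((B : Int) - 3) 0 = ((B - 3 : Nat) : Int) := by omega
    rw [hmax]
    have htn : (((B - 3 : Nat) : Int)).toNat = B - 3 := by omega
    rw [htn]
    have e1 : B - 3 + 2 = B - 1 := by omega
    have e2 : B - 3 + 1 = B - 2 := by omega
    have e3 : B - 2 - 1 = B - 3 := by omega
    rw [e1, e2, e3]
    have hpw : 2 * (2 : Int) ^ (B - 2) = 2 ^ (B - 1) := by
      have hbe : B - 1 = (B - 2) + 1 := by omega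
      rw [hbe, pow_succ]
      ring
    simp only [hpw]
    split_ifs with h
    · simp only [List.length_append, List.length_cons, List.length_nil, arrOf_length]
      push_cast
      omega
    · rw [arrOf_length]
      push_cast
      omega

-- ===== VERDICT (by name: the statement is the Claim_ definition above) =====
theorem get_generous_spec : Claim_equal_get_generous := by
  intro n _
  unfold Spec_get_generous
  exact get_generous_eq_alt n
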